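-- pv_equiv track=rewrite | github.com/prabhudev740/misc | tasks/tasks_by_venu/paper4.py | get_word_len
-- ===== SOURCE A (Python) =====
-- def get_word_len(text):
--     temp = ''
--     count = 0
--     res = {}
--
--     for char in text:
--         if char == " ":
--             res[temp] = count
--             count = 0
--             temp = ''
--             continue
--
--         count += 1
--         temp += char
--
--     res[temp] = count
--     return res
-- ===== SOURCE B (Python) =====
-- def get_word_len(text):
--     return {w: len(w) for w in text.split(" ")}
-- ===== Notes on version B (the rewrite author's own statement) =====
-- stated objective: idiomatic
-- what changed: B splits the text on single spaces and maps each word to its length in one dict comprehension, replacing A's character-by-character accumulation of the current word and its running count.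
import Mathlib
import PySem

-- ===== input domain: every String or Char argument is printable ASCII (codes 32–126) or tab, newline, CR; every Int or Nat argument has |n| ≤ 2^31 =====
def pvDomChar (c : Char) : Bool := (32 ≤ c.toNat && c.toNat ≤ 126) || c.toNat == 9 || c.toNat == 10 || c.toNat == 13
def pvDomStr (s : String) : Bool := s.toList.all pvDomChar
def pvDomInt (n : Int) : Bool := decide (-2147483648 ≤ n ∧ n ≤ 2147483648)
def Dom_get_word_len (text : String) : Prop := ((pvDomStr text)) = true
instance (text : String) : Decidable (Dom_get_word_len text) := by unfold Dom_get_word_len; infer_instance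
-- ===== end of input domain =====

-- B maps each word of text.split(" ") to its length in one dict comprehension instead of
-- A's character-by-character accumulation of the current word and a running count (idiomatic).

-- ===== PORT A =====
-- A's loop state: (temp, count, res); the loop walks the characters of text.
def get_word_len (text : String) : List (String × Int) :=
  let st := text.toList.foldl
    (fun (s : List Char × Int × PySem.Dict String Int) c =>
      if c = ' ' then
        ([], 0, s.2.2.insert (String.ofList s.1) s.2.1)
      else
        (s.1 ++ [c], s.2.1 + 1, s.2.2))
    ([], 0, PySem.Dict.empty)
  ((st.2.2.insert (String.ofList st.1) st.2.1)).items

-- ===== PORT B =====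
def get_word_len_alt (text : String) : List (String × Int) :=
  (((PySem.Str.split? text " ").getD []).foldl
    (fun (d : PySem.Dict String Int) w => d.insert w (PySem.Str.len w))
    PySem.Dict.empty).items

-- ===== PRECONDITION & SPEC =====
def Spec_get_word_len (text : String) (out : List (String × Int)) : Prop := out = get_word_len_alt text
instance (text : String) (out : List (String × Int)) : Decidable (Spec_get_word_len text out) := by unfold Spec_get_word_len; infer_instance

-- ===== CLAIM (what is proved, stated in full; the proofs are below) =====
def Claim_equal_get_word_len : Prop := ∀ (text : String), Dom_get_word_len text → Spec_get_word_len text (get_word_len text)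

-- ===== LEMMAS AND PROOFS =====

-- Reference splitter: splitting `pre ++ l` on single spaces where `pre` is the prefix of the
-- current word already consumed.
def pvSplit (pre : List Char) : List Char → List (List Char)
  | [] => [pre]
  | c :: rest => if c = ' ' then pre :: pvSplit [] rest else pvSplit (pre ++ [c]) rest

theorem pvGo_eq (l : List Char) : ∀ (fuel : Nat) (cur : List Char) (acc : List (List Char)),
    l.length < fuel →
    PySem.Chars.splitOn.go [' '] fuel l cur acc = acc.reverse ++ pvSplit cur.reverse l := by
  induction l with
  | nil =>
    intro fuel cur acc h
    cases fuel with
    | zero => omega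
    | succ f => simp [PySem.Chars.splitOn.go, pvSplit]
  | cons c rest ih =>
    intro fuel cur acc h
    cases fuel with
    | zero => simp at h
    | succ f =>
      by_cases hc : c = ' '
      · subst hc
        simp only [PySem.Chars.splitOn.go, List.isPrefixOf, BEq.rfl, Bool.true_and,
          if_true]
        simp only [List.length_cons, List.length_nil, List.drop_succ_cons, List.drop_zero]
        rw [ih f [] (cur.reverse :: acc) (by simpa using h)]
        simp [pvSplit]
      · have hpre : ([' '] : List Char).isPrefixOf (c :: rest) = false := by
          simp [List.isPrefixOf]
          exact fun h' => (hc h'.symm).elim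
        simp only [PySem.Chars.splitOn.go, hpre, if_neg, Bool.false_eq_true, not_false_eq_true]
        rw [ih f (c :: cur) acc (by simpa using h)]
        simp [pvSplit, hc]

theorem pvSplitOn_eq (l : List Char) : PySem.Chars.splitOn l [' '] = pvSplit [] l := by
  have := pvGo_eq l (l.length + 1) [] [] (by omega)
  simpa [PySem.Chars.splitOn] using this

-- Loop invariant: running A's character loop from state (temp, |temp|, res) and then doing the
-- final insert equals folding B's insert over the words of pvSplit temp cs, starting from res.
theorem pvLoop_eq (cs : List Char) : ∀ (temp : List Char) (res : PySem.Dict String Int),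
    (let st := cs.foldl
        (fun (s : List Char × Int × PySem.Dict String Int) c =>
          if c = ' ' then
            ([], 0, s.2.2.insert (String.ofList s.1) s.2.1)
          else
            (s.1 ++ [c], s.2.1 + 1, s.2.2))
        (temp, (temp.length : Int), res)
     st.2.2.insert (String.ofList st.1) st.2.1)
    = (pvSplit temp cs).foldl
        (fun (d : PySem.Dict String Int) w => d.insert (String.ofList w) ((w.length : Nat) : Int))
        res := by
  induction cs with
  | nil => intro temp res; simp [pvSplit]
  | cons c rest ih =>
    intro temp res
    by_cases hc : c = ' '
    · subst hc
      simp only [List.foldl_cons, if_true]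
      have h0 : ((0 : Int)) = ((([] : List Char).length : Nat) : Int) := by simp
      rw [show ((([] : List Char), (0 : Int), res.insert (String.ofList temp) (temp.length : Int)))
            = (([] : List Char), ((([] : List Char).length : Nat) : Int),
               res.insert (String.ofList temp) (temp.length : Int)) by simp]
      rw [ih [] (res.insert (String.ofList temp) (temp.length : Int))]
      simp [pvSplit]
    · simp only [List.foldl_cons, if_neg hc]
      rw [show ((temp ++ [c], (temp.length : Int) + 1, res))
            = (temp ++ [c], (((temp ++ [c]).length : Nat) : Int), res) by simp]
      rw [ih (temp ++ [c]) res]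
      simp [pvSplit, hc]

-- ===== VERDICT (by name: the statement is the Claim_ definition above) =====
theorem get_word_len_spec : Claim_equal_get_word_len := by
  intro text _
  show get_word_len text = get_word_len_alt text
  have h := pvLoop_eq text.toList [] PySem.Dict.empty
  simp only [List.length_nil, Nat.cast_zero] at h
  have hA : get_word_len text
      = ((pvSplit [] text.toList).foldl
          (fun (d : PySem.Dict String Int) w =>
            d.insert (String.ofList w) ((w.length : Nat) : Int))
          PySem.Dict.empty).items := by
    unfold get_word_len
    exact congrArg PySem.Dict.items h
  rw [hA]
  unfold get_word_len_alt
  rw [show PySem.Str.split? text " "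
        = some ((PySem.Chars.splitOn text.toList [' ']).map String.ofList) from by
      simp [PySem.Str.split?, PySem.Chars.split?]]
  rw [pvSplitOn_eq, Option.getD_some, List.foldl_map]
  simp [PySem.Str.len_eq]
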